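-- pv_equiv track=rewrite | github.com/Matrixuniverses/ConvexHullsAlgorithms | convexhull.py | min_y
-- ===== SOURCE A (Python) =====
-- def min_y(listPts):
--     """ Returns a tuple of the minimum-rightmost point
--         of the given point list
--     """
--
--     # Defining the initial minimum values
--     min_y = float('inf')
--     min_point = None
--
--     # Iteration through all points to find all those with lowest y co-ordinate
--     for point in listPts:
--         if point[1] < min_y:
--
--             # Found a new min point
--             min_y = point[1]
--             min_point = point
--
--         # Found a point on the same y level as the min point
--         elif point[1] == min_y:
--
--             # Choosing the right most point off of x value
--             if point[0] > min_point[0]: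
--                 min_point = point
--
--     return min_point, listPts.index(min_point)
-- ===== SOURCE B (Python) =====
-- def min_y(listPts):
--     """ Returns a tuple of the minimum-rightmost point
--         of the given point list
--     """
--     # Pass 1: minimal y value
--     lowest = min(p[1] for p in listPts)
--     # Pass 2: among points at that y level, the one with the largest x
--     # (Python's max returns the first maximal element, matching first-kept ties)
--     min_point = max((p for p in listPts if p[1] == lowest), key=lambda p: p[0])
--     return min_point, listPts.index(min_point)
-- ===== Notes on version B (the rewrite author's own statement) =====
-- stated objective: simpler
-- what changed: Replaced the fused single-pass scan maintaining (min_y, min_point) state with two declarative passes: min over the y-values, then max-by-x over the points at that y level.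
import Mathlib
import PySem

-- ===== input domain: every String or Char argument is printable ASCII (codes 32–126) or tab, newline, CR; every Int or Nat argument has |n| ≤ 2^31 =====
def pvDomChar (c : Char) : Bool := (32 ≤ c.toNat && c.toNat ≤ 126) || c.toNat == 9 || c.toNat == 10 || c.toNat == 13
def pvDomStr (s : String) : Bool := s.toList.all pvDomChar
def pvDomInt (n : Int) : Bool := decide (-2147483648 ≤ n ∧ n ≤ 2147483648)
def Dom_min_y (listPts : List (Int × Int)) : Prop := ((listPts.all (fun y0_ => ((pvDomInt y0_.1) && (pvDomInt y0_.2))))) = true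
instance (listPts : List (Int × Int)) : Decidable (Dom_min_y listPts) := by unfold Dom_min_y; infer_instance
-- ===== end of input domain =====

-- B replaces A's fused single-pass (min_y, min_point) scan with two passes: min over the
-- y-values, then first-max-by-x over the points at that y level (objective: simpler).

-- ===== PORT A =====
-- state: (min_y : Option Int  -- none = float('inf'), min_point : Option (Int × Int))
def min_y (listPts : List (Int × Int)) : (Int × Int) × Int :=
  let st := listPts.foldl
    (fun (st : Option Int × Option (Int × Int)) point =>
      match st.1 with
      | none => (some point.2, some point)            -- point[1] < inf
      | some m =>
        if point.2 < m then (some point.2, some point)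
        else if point.2 = m then
          (st.1, match st.2 with
                 | some mp => if point.1 > mp.1 then some point else some mp
                 | none => some point)
        else st)
    (none, none)
  match st.2 with
  | some mp => (mp, (((PySem.List.index? listPts mp).getD 0 : Nat) : Int))
  | none => ((0, 0), -1)     -- unreachable under Pre_: listPts.index(None) raises ValueError

-- ===== PORT B =====
def min_y_alt (listPts : List (Int × Int)) : (Int × Int) × Int :=
  match PySem.List.min? (listPts.map Prod.snd) (fun y => y) with
  | none => ((0, 0), -1)     -- unreachable under Pre_: min() on empty raises ValueError
  | some lowest =>
    match PySem.List.max? (listPts.filter (fun p => p.2 == lowest)) Prod.fst with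
    | none => ((0, 0), -1)   -- unreachable: the minimising point passes the filter
    | some mp => (mp, (((PySem.List.index? listPts mp).getD 0 : Nat) : Int))

-- ===== PRECONDITION & SPEC =====
-- A raises ValueError on the empty list (listPts.index(None)); so does B (min() of empty).
def Pre_min_y (listPts : List (Int × Int)) : Prop := listPts ≠ []
instance (listPts : List (Int × Int)) : Decidable (Pre_min_y listPts) := by unfold Pre_min_y; infer_instance
def pvWitness_min_y : (List (Int × Int)) := [(1, 2), (3, 0), (-1, 0)]

def Spec_min_y (listPts : List (Int × Int)) (out : (Int × Int) × Int) : Prop := out = min_y_alt listPts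
instance (listPts : List (Int × Int)) (out : (Int × Int) × Int) : Decidable (Spec_min_y listPts out) := by unfold Spec_min_y; infer_instance

-- ===== CLAIM (what is proved, stated in full; the proofs are below) =====
def Claim_equal_min_y : Prop := ∀ (listPts : List (Int × Int)), Dom_min_y listPts → Pre_min_y listPts → Spec_min_y listPts (min_y listPts)

-- ===== LEMMAS AND PROOFS =====

-- the combined "lower y, else same y and strictly larger x wins" update of A's loop
def pvBetter (a p : Int × Int) : Int × Int :=
  if p.2 < a.2 then p else if p.2 = a.2 ∧ p.1 > a.1 then p else a

theorem pvBetter_snd (a p : Int × Int) :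
    (pvBetter a p).2 = if p.2 < a.2 then p.2 else a.2 := by
  unfold pvBetter; split_ifs with h1 h2 <;> simp_all

theorem pvFold_snd (t : List (Int × Int)) : ∀ (a : Int × Int),
    (t.foldl pvBetter a).2 =
      t.foldl (fun (m : Int) (z : Int × Int) => if z.2 < m then z.2 else m) a.2 := by
  induction t with
  | nil => intro a; rfl
  | cons p t ih =>
    intro a
    simp only [List.foldl_cons, ih, pvBetter_snd]

theorem pvFold_snd_le (t : List (Int × Int)) (a : Int × Int) :
    (t.foldl pvBetter a).2 ≤ a.2 := by
  induction t generalizing a with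
  | nil => simp
  | cons p t ih =>
    simp only [List.foldl_cons]
    calc (t.foldl pvBetter (pvBetter a p)).2 ≤ (pvBetter a p).2 := ih _
      _ ≤ a.2 := by rw [pvBetter_snd]; split <;> omega

-- min?/max? on a nonempty list: the Option accumulator never returns to none
theorem pvMin?_cons (r : List Int) : ∀ (x : Int),
    PySem.List.min? (x :: r) (fun y => y) =
      some (r.foldl (fun m z => if z < m then z else m) x) := by
  induction r with
  | nil => intro x; rfl
  | cons z r ih =>
    intro x
    have key : PySem.List.min? (x :: z :: r) (fun y => y)
        = PySem.List.min? ((if z < x then z else x) :: r) (fun y => y) := by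
      show List.foldl _ (if z < x then some z else some x) r
          = List.foldl _ (some (if z < x then z else x)) r
      congr 1
      split <;> rfl
    rw [key, ih]
    simp only [List.foldl_cons]

theorem pvMax?_cons (r : List (Int × Int)) : ∀ (x : Int × Int),
    PySem.List.max? (x :: r) Prod.fst =
      some (r.foldl (fun a z => if a.1 < z.1 then z else a) x) := by
  induction r with
  | nil => intro x; rfl
  | cons z r ih =>
    intro x
    have key : PySem.List.max? (x :: z :: r) Prod.fst
        = PySem.List.max? ((if x.1 < z.1 then z else x) :: r) Prod.fst := by
      show List.foldl _ (if x.1 < z.1 then some z else some x) r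
          = List.foldl _ (some (if x.1 < z.1 then z else x)) r
      congr 1
      split <;> rfl
    rw [key, ih]
    simp only [List.foldl_cons]

-- B's second pass recovers A's fold result
theorem pvMain (t : List (Int × Int)) : ∀ (x : Int × Int),
    PySem.List.max? ((x :: t).filter (fun z => z.2 == (t.foldl pvBetter x).2)) Prod.fst =
      some (t.foldl pvBetter x) := by
  induction t with
  | nil => intro x; simp [pvMax?_cons]
  | cons p t ih =>
    intro x
    simp only [List.foldl_cons]
    have hle := pvFold_snd_le t (pvBetter x p)
    have hb2 : (pvBetter x p).2 = if p.2 < x.2 then p.2 else x.2 := pvBetter_snd x p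
    set b := t.foldl pvBetter (pvBetter x p) with hbdef
    have ih' := ih (pvBetter x p)
    rw [← hbdef] at ih'
    by_cases hx : x.2 = b.2
    · by_cases hp : p.2 = b.2
      · -- both survive the filter; pvBetter x p is max?'s first step on [x, p]
        have hfx : ((x :: p :: t).filter (fun z => z.2 == b.2)) =
            x :: p :: (t.filter (fun z => z.2 == b.2)) := by
          simp [List.filter_cons, hx, hp]
        have hb' : (pvBetter x p).2 = b.2 := by
          unfold pvBetter; split_ifs <;> simp_all
        have hfx' : ((pvBetter x p :: t).filter (fun z => z.2 == b.2)) =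
            pvBetter x p :: (t.filter (fun z => z.2 == b.2)) := by
          simp [List.filter_cons, hb']
        rw [hfx, pvMax?_cons]
        rw [hfx', pvMax?_cons] at ih'
        have hstep : (if x.1 < p.1 then p else x) = pvBetter x p := by
          unfold pvBetter
          have hnp : ¬ p.2 < x.2 := by omega
          split_ifs <;> simp_all <;> omega
        simpa [List.foldl_cons, hstep] using ih'
      · -- p is filtered out, and pvBetter x p = x  (x.2 = b.2 forces x.2 < p.2)
        have hpgt : x.2 < p.2 := by
          rw [hb2] at hle; split_ifs at hle <;> omega
        have hbx : pvBetter x p = x := by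
          unfold pvBetter
          have h1 : ¬ p.2 < x.2 := by omega
          have h2 : ¬ (p.2 = x.2 ∧ p.1 > x.1) := by rintro ⟨h, -⟩; omega
          rw [if_neg h1, if_neg h2]
        have hfx : ((x :: p :: t).filter (fun z => z.2 == b.2)) =
            ((x :: t).filter (fun z => z.2 == b.2)) := by
          simp [List.filter_cons, hx, hp]
        rw [hbx] at ih'
        rw [hfx]; exact ih'
    · -- x is filtered out
      have hxlt : b.2 < x.2 := by
        rw [hb2] at hle; split_ifs at hle <;> omega
      have hfx : ((x :: p :: t).filter (fun z => z.2 == b.2)) =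
          ((pvBetter x p :: t).filter (fun z => z.2 == b.2)) := by
        by_cases hp : p.2 = b.2
        · have hplt : p.2 < x.2 := by omega
          have hbp : pvBetter x p = p := by unfold pvBetter; simp [hplt]
          simp [List.filter_cons, hx, hp, hbp]
        · have hbne : ¬ (pvBetter x p).2 = b.2 := by
            unfold pvBetter; split_ifs <;> simp_all
          simp [List.filter_cons, hx, hp, hbne]
      rw [hfx]; exact ih'

-- A's fold over a nonempty list computes (some b.2, some b) with b = t.foldl pvBetter x
theorem pvAstate (t : List (Int × Int)) : ∀ (mp : Int × Int),
    t.foldl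
      (fun (st : Option Int × Option (Int × Int)) point =>
        match st.1 with
        | none => (some point.2, some point)
        | some m =>
          if point.2 < m then (some point.2, some point)
          else if point.2 = m then
            (st.1, match st.2 with
                   | some mbp => if point.1 > mbp.1 then some point else some mbp
                   | none => some point)
          else st)
      (some mp.2, some mp)
      = (some (t.foldl pvBetter mp).2, some (t.foldl pvBetter mp)) := by
  induction t with
  | nil => intro mp; rfl
  | cons p t ih =>
    intro mp
    simp only [List.foldl_cons]
    have hstep :
        (if p.2 < mp.2 then ((some p.2 : Option Int), (some p : Option (Int × Int)))
         else if p.2 = mp.2 then (some mp.2, if p.1 > mp.1 then some p else some mp)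
         else (some mp.2, some mp))
          = (some (pvBetter mp p).2, some (pvBetter mp p)) := by
      unfold pvBetter
      by_cases h1 : p.2 < mp.2
      · simp [h1]
      · by_cases h2 : p.2 = mp.2
        · by_cases h3 : p.1 > mp.1 <;> simp [h1, h2, h3]
        · simp [h1, h2]
    rw [hstep]
    exact ih (pvBetter mp p)

-- ===== VERDICT (by name: the statement is the Claim_ definition above) =====
theorem min_y_spec : Claim_equal_min_y := by
  intro listPts _ hpre
  unfold Spec_min_y
  match listPts with
  | [] => exact absurd rfl hpre
  | x :: t =>
    unfold min_y min_y_alt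
    simp only [List.foldl_cons, List.map_cons]
    rw [pvAstate t x, pvMin?_cons]
    have hmin : (t.map Prod.snd).foldl (fun m z => if z < m then z else m) x.2
        = (t.foldl pvBetter x).2 := by
      rw [List.foldl_map, pvFold_snd]
    rw [hmin]
    simp only [pvMain t x]
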